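-- pv_equiv track=rewrite | github.com/jonahwei19/scrooge-list | regen_v3/_fabricated.py | _iter_backticked
-- ===== SOURCE A (Python) =====
-- def _iter_backticked(line: str):
--     """Yield each backtick-wrapped substring on a line."""
--     i = 0
--     while i < len(line):
--         lo = line.find("`", i)
--         if lo < 0:
--             return
--         hi = line.find("`", lo + 1)
--         if hi < 0:
--             return
--         yield line[lo + 1:hi].strip()
--         i = hi + 1
-- ===== SOURCE B (Python) =====
-- def _iter_backticked(line: str):
--     """Yield each backtick-wrapped substring on a line."""
--     parts = line.split("`")
--     for j in range(1, len(parts) - 1, 2):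
--         yield parts[j].strip()
-- ===== Notes on version B (the rewrite author's own statement) =====
-- stated objective: idiomatic
-- what changed: Replaces the index-tracking while loop over repeated str.find calls with a single split on the backtick character followed by striding over the odd-indexed interior segments (the contents of each closed backtick pair).
import Mathlib
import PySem

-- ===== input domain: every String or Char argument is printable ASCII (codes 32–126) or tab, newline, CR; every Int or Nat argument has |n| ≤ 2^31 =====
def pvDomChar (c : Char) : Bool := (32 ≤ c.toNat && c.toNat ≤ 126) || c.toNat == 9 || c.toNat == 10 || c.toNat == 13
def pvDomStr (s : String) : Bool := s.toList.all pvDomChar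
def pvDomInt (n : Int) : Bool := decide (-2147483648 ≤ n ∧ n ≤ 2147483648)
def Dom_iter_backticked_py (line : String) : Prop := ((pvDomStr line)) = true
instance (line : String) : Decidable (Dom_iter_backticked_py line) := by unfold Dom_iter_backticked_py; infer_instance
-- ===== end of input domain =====

-- B replaces A's index-tracking while loop over str.find with one split('`') plus a
-- stride over the odd-indexed interior segments; same return values, idiomatic rewrite.

-- ===== PORT A =====
-- helper cited by the port's decreasing_by: a successful find never lands before its start
theorem pvFindFrom_ge_start (s sub : List Char) (st : Int) (h0 : 0 ≤ st)
    (h : PySem.Chars.findFrom s sub st none ≠ -1) :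
    st ≤ PySem.Chars.findFrom s sub st none := by
  unfold PySem.Chars.findFrom at *
  have := PySem.Chars.neg_one_le_find (List.drop st.toNat (List.take (Int.toNat s.length) s)) sub
  simp only at *
  split_ifs at * with h1 h2 <;> omega

-- literal transliteration of A's while loop: i is the scan index into line
def iterALoop (s : List Char) (i : Nat) : List String :=
  if hlt : i < s.length then
    let lo := PySem.Chars.findFrom s ['`'] (i : Int) none
    if hlo : lo < 0 then []
    else
      let hi := PySem.Chars.findFrom s ['`'] (lo + 1) none
      if hhi : hi < 0 then []
      else
        String.ofList (PySem.Chars.strip (PySem.Chars.slice s (some (lo + 1)) (some hi)))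
          :: iterALoop s (hi.toNat + 1)
  else []
  termination_by s.length - i
  decreasing_by
    have hhi' : ¬ PySem.Chars.findFrom s ['`'] (PySem.Chars.findFrom s ['`'] (i : Int) none + 1) none < 0 := hhi
    have h1 : (i : Int) ≤ PySem.Chars.findFrom s ['`'] (i : Int) none :=
      pvFindFrom_ge_start s ['`'] (i : Int) (by omega) (by omega)
    have h2 : PySem.Chars.findFrom s ['`'] (i : Int) none + 1
        ≤ PySem.Chars.findFrom s ['`'] (PySem.Chars.findFrom s ['`'] (i : Int) none + 1) none :=
      pvFindFrom_ge_start s ['`'] _ (by omega) (by omega)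
    omega

def iter_backticked_py (line : String) : List String := iterALoop line.toList 0

-- ===== PORT B =====
def iter_backticked_py_alt (line : String) : List String :=
  let parts := (PySem.Str.split? line "`").getD []
  (PySem.List.pyRange 1 ((parts.length : Int) - 1) 2).map
    (fun j => PySem.Str.strip (PySem.List.pyGetD parts j ""))

-- ===== PRECONDITION & SPEC =====
def Spec_iter_backticked_py (line : String) (out : List String) : Prop := out = iter_backticked_py_alt line
instance (line : String) (out : List String) : Decidable (Spec_iter_backticked_py line out) := by unfold Spec_iter_backticked_py; infer_instance

-- ===== CLAIM (what is proved, stated in full; the proofs are below) =====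
def Claim_equal_iter_backticked_py : Prop := ∀ (line : String), Dom_iter_backticked_py line → Spec_iter_backticked_py line (iter_backticked_py line)

-- ===== LEMMAS AND PROOFS =====

-- reference single-character split (structural), the common ground of both proofs
def splitRef (c : Char) : List Char → List (List Char)
  | [] => [[]]
  | x :: xs =>
    if x = c then [] :: splitRef c xs
    else
      match splitRef c xs with
      | [] => [[x]]
      | p :: ps => (x :: p) :: ps

-- the common value: strip of every odd-indexed segment that has a successor
def oddFS : List (List Char) → List String
  | _ :: b :: c :: rest => String.ofList (PySem.Chars.strip b) :: oddFS (c :: rest)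
  | _ => []

theorem splitRef_ne_nil (c : Char) (t : List Char) : splitRef c t ≠ [] := by
  cases t with
  | nil => simp [splitRef]
  | cons x xs =>
    simp only [splitRef]
    split
    · simp
    · split <;> simp

theorem splitRef_not_mem (c : Char) (t : List Char) (h : c ∉ t) : splitRef c t = [t] := by
  induction t with
  | nil => simp [splitRef]
  | cons x xs ih =>
    simp only [List.mem_cons, not_or] at h
    simp only [splitRef, if_neg (Ne.symm h.1), ih h.2]

theorem splitRef_append (c : Char) (a b : List Char) (h : c ∉ a) :
    splitRef c (a ++ c :: b) = a :: splitRef c b := by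
  induction a with
  | nil => simp [splitRef]
  | cons x xs ih =>
    simp only [List.mem_cons, not_or] at h
    simp only [List.cons_append, splitRef, if_neg (Ne.symm h.1), ih h.2]

theorem first_split (c : Char) (t : List Char) (h : c ∈ t) :
    ∃ a b, t = a ++ c :: b ∧ c ∉ a := by
  induction t with
  | nil => simp at h
  | cons x xs ih =>
    by_cases hx : x = c
    · exact ⟨[], xs, by simp [hx], by simp⟩
    · have h' : c ∈ xs := by
        rcases List.mem_cons.mp h with h1 | h1
        · exact absurd h1.symm hx
        · exact h1
      rcases ih h' with ⟨a, b, rfl, ha⟩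
      refine ⟨x :: a, b, by simp, ?_⟩
      simp only [List.mem_cons, not_or]
      exact ⟨fun hc => hx hc.symm, ha⟩

theorem find_not_mem (c : Char) (t : List Char) (h : c ∉ t) :
    PySem.Chars.find t [c] = -1 := by
  rw [PySem.Chars.find_eq_neg_one_iff, List.singleton_infix_iff]
  exact h

theorem find_first (c : Char) (a b : List Char) (h : c ∉ a) :
    PySem.Chars.find (a ++ c :: b) [c] = (a.length : Int) := by
  have hne : PySem.Chars.find (a ++ c :: b) [c] ≠ -1 := by
    rw [ne_eq, PySem.Chars.find_eq_neg_one_iff, List.singleton_infix_iff]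
    simp
  have h0 : 0 ≤ PySem.Chars.find (a ++ c :: b) [c] := by
    have := PySem.Chars.neg_one_le_find (a ++ c :: b) [c]
    omega
  obtain ⟨hpre, hmin⟩ := PySem.Chars.find_spec h0
  set k := (PySem.Chars.find (a ++ c :: b) [c]).toNat with hk
  have hle : k ≤ a.length := by
    by_contra hgt
    exact hmin a.length (by omega) (by simp)
  have hge : a.length ≤ k := by
    by_contra hlt
    push_neg at hlt
    rcases hpre with ⟨tail, htail⟩
    rw [List.drop_append_of_le_length (by omega), List.drop_eq_getElem_cons (by omega)] at htail
    simp only [List.cons_append, List.cons.injEq] at htail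
    apply h
    rw [htail.1]
    exact List.getElem_mem _
  omega

theorem aLoop_eq (s : List Char) (i : Nat) (hle : i ≤ s.length) :
    iterALoop s i = oddFS (splitRef '`' (s.drop i)) := by
  rw [iterALoop]
  by_cases hlt : i < s.length
  · rw [dif_pos hlt]
    by_cases hmem : '`' ∈ s.drop i
    · rcases first_split '`' (s.drop i) hmem with ⟨a, b1, hdrop, ha⟩
      have hlen1 : s.length = i + a.length + 1 + b1.length := by
        have := List.length_drop (l := s) (i := i)
        rw [hdrop] at this
        simp at this
        omega
      have hfind1 : PySem.Chars.findFrom s ['`'] (i : Int) none = ((i + a.length : Nat) : Int) := by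
        rw [PySem.Chars.findFrom_natCast s ['`'] i (by omega), hdrop, find_first '`' a b1 ha]
        rw [if_neg (by omega)]
        push_cast
        ring
      rw [hfind1]
      rw [dif_neg (by omega)]
      have hcast1 : ((i + a.length : Nat) : Int) + 1 = ((i + a.length + 1 : Nat) : Int) := by
        push_cast; ring
      have hdrop2 : s.drop (i + a.length + 1) = b1 := by
        have : s.drop (i + a.length + 1) = (s.drop i).drop (a.length + 1) := by
          rw [List.drop_drop]; ring_nf
        rw [this, hdrop]
        rw [show a ++ '`' :: b1 = (a ++ ['`']) ++ b1 by simp]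
        rw [List.drop_append_of_le_length (by simp)]
        simp
      by_cases hmem2 : '`' ∈ b1
      · rcases first_split '`' b1 hmem2 with ⟨a2, b2, hb1, ha2⟩
        have hlen2 : b1.length = a2.length + 1 + b2.length := by
          rw [hb1]; simp; omega
        have hfind2 : PySem.Chars.findFrom s ['`'] (((i + a.length : Nat) : Int) + 1) none
            = ((i + a.length + 1 + a2.length : Nat) : Int) := by
          rw [hcast1, PySem.Chars.findFrom_natCast s ['`'] (i + a.length + 1) (by omega),
            hdrop2, hb1, find_first '`' a2 b2 ha2]
          rw [if_neg (by omega)]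
          push_cast
          ring
        rw [hfind2]
        rw [dif_neg (by omega)]
        -- the slice between the two backticks is exactly a2
        have hslice : PySem.Chars.slice s (some (((i + a.length : Nat) : Int) + 1))
            (some ((i + a.length + 1 + a2.length : Nat) : Int)) = a2 := by
          unfold PySem.Chars.slice
          rw [hcast1, PySem.List.slice_toNat _ (by omega) (by omega)]
          simp only [Int.toNat_natCast]
          rw [hdrop2, hb1]
          rw [show (i + a.length + 1 + a2.length) - (i + a.length + 1) = a2.length by omega]
          rw [List.take_append_of_le_length (by omega)]
          simp
        rw [hslice]
        have hrec : iterALoop s (((i + a.length + 1 + a2.length : Nat) : Int).toNat + 1)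
            = oddFS (splitRef '`' b2) := by
          rw [show ((i + a.length + 1 + a2.length : Nat) : Int).toNat + 1
              = i + a.length + 1 + a2.length + 1 by omega]
          rw [aLoop_eq s (i + a.length + 1 + a2.length + 1) (by omega)]
          congr 2
          have : s.drop (i + a.length + 1 + a2.length + 1) = b1.drop (a2.length + 1) := by
            rw [← hdrop2, List.drop_drop]
            ring_nf
          rw [this, hb1]
          rw [show a2 ++ '`' :: b2 = (a2 ++ ['`']) ++ b2 by simp]
          rw [List.drop_append_of_le_length (by simp)]
          simp
        rw [hrec]
        rw [hdrop, splitRef_append '`' a b1 ha, hb1, splitRef_append '`' a2 b2 ha2]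
        rcases List.exists_cons_of_ne_nil (splitRef_ne_nil '`' b2) with ⟨q, qs, hq⟩
        rw [hq]
        simp [oddFS]
      · have hfind2 : PySem.Chars.findFrom s ['`'] (((i + a.length : Nat) : Int) + 1) none = -1 := by
          rw [hcast1, PySem.Chars.findFrom_natCast s ['`'] (i + a.length + 1) (by omega),
            hdrop2, find_not_mem '`' b1 hmem2]
          simp
        rw [hfind2]
        rw [dif_pos (by omega)]
        rw [hdrop, splitRef_append '`' a b1 ha, splitRef_not_mem '`' b1 hmem2]
        simp [oddFS]
    · have hfind1 : PySem.Chars.findFrom s ['`'] (i : Int) none = -1 := by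
        rw [PySem.Chars.findFrom_natCast s ['`'] i (by omega), find_not_mem '`' (s.drop i) hmem]
        simp
      rw [hfind1]
      rw [dif_pos (by omega)]
      rw [splitRef_not_mem '`' (s.drop i) hmem]
      simp [oddFS]
  · rw [dif_neg hlt]
    have : s.drop i = [] := by
      rw [List.drop_eq_nil_iff]
      omega
    rw [this]
    simp [splitRef, oddFS]
  termination_by s.length - i
  decreasing_by omega

-- PySem.Chars.splitOn with a one-character separator is the reference split
def mapHead (f : List Char → List Char) : List (List Char) → List (List Char)
  | [] => []
  | x :: xs => f x :: xs

theorem go_master (c : Char) (fuel : Nat) (l cur acc : _) (hf : l.length ≤ fuel) :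
    PySem.Chars.splitOn.go [c] fuel l cur acc
      = acc.reverse ++ mapHead (fun p => cur.reverse ++ p) (splitRef c l) := by
  induction fuel generalizing l cur acc with
  | zero =>
    have : l = [] := by simpa using List.length_eq_zero_iff.mp (by omega)
    subst this
    simp [PySem.Chars.splitOn.go, splitRef, mapHead]
  | succ fuel ih =>
    cases l with
    | nil => simp [PySem.Chars.splitOn.go, splitRef, mapHead]
    | cons ch rest =>
      rw [PySem.Chars.splitOn.go]
      by_cases hc : ch = c
      · subst hc
        have hpre : [ch].isPrefixOf (ch :: rest) = true := by simp [List.isPrefixOf]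
        rw [if_pos hpre]
        simp only [List.length_singleton, List.drop_one, List.tail_cons]
        rw [ih rest [] (cur.reverse :: acc) (by simpa using Nat.le_of_succ_le_succ (by simpa using hf))]
        rcases List.exists_cons_of_ne_nil (splitRef_ne_nil ch rest) with ⟨p, ps, hsp⟩
        simp [splitRef, hsp, mapHead]
      · have hpre : [c].isPrefixOf (ch :: rest) = false := by
          simp [List.isPrefixOf]
          exact fun h => hc h.symm
        rw [if_neg (by simp [hpre])]
        rw [ih rest (ch :: cur) acc (by simpa using Nat.le_of_succ_le_succ (by simpa using hf))]
        rcases List.exists_cons_of_ne_nil (splitRef_ne_nil c rest) with ⟨p, ps, hsp⟩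
        simp [splitRef, hsp, mapHead, if_neg hc]

theorem chars_splitOn_eq_splitRef (t : List Char) (c : Char) :
    PySem.Chars.splitOn t [c] = splitRef c t := by
  unfold PySem.Chars.splitOn
  rw [go_master c (t.length + 1) t [] [] (by omega)]
  rcases List.exists_cons_of_ne_nil (splitRef_ne_nil c t) with ⟨p, ps, hsp⟩
  simp [hsp, mapHead]

-- B-side: the stride over odd interior indices computes oddFS of the split
theorem pyRange_pos_cons (a b s : Int) (hs : 0 < s) (hab : a < b) :
    PySem.List.pyRange a b s = a :: PySem.List.pyRange (a + s) b s := by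
  rw [PySem.List.pyRange_of_pos _ _ hs, PySem.List.pyRange_of_pos _ _ hs]
  have hn : (if a < b then ((b - a + s - 1) / s).toNat else 0)
      = (if a + s < b then ((b - (a + s) + s - 1) / s).toNat else 0) + 1 := by
    rw [if_pos hab]
    by_cases h2 : a + s < b
    · rw [if_pos h2]
      have heq : (b - a + s - 1) / s = (b - (a + s) + s - 1) / s + 1 := by
        have harg : b - a + s - 1 = (b - (a + s) + s - 1) + 1 * s := by ring
        rw [harg, Int.add_mul_ediv_right _ _ (by omega)]
      have hnn : 0 ≤ (b - (a + s) + s - 1) / s :=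
        Int.ediv_nonneg (by omega) (by omega)
      omega
    · rw [if_neg h2]
      have h1 : 1 ≤ (b - a + s - 1) / s := by
        rw [Int.le_ediv_iff_mul_le hs]
        omega
      have hlt : (b - a + s - 1) / s < 2 := by
        rw [Int.ediv_lt_iff_lt_mul hs]
        omega
      omega
  rw [hn, List.range_succ_eq_map]
  simp only [List.map_cons, List.map_map]
  congr 1
  · simp
  apply List.map_congr_left
  intro k _
  simp [Nat.succ_eq_add_one]
  ring

theorem pyRange_pos_nil (a b s : Int) (hs : 0 < s) (hab : b ≤ a) :
    PySem.List.pyRange a b s = [] := by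
  rw [PySem.List.pyRange_of_pos _ _ hs, if_neg (by omega)]
  simp

theorem pyRange_shift (a b d s : Int) (hs : 0 < s) :
    PySem.List.pyRange (a + d) (b + d) s = (PySem.List.pyRange a b s).map (· + d) := by
  rw [PySem.List.pyRange_of_pos _ _ hs, PySem.List.pyRange_of_pos _ _ hs, List.map_map]
  by_cases hab : a < b
  · rw [if_pos (by omega), if_pos hab]
    have harg : b + d - (a + d) + s - 1 = b - a + s - 1 := by ring
    rw [harg]
    apply List.map_congr_left
    intro k _
    simp
    ring
  · rw [if_neg (by omega), if_neg hab]
    simp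

theorem pyGetD_cons_succ (x : String) (xs : List String) (j : Int) (d : String) (hj : 0 ≤ j) :
    PySem.List.pyGetD (x :: xs) (j + 1) d = PySem.List.pyGetD xs j d := by
  rw [PySem.List.pyGetD_of_nonneg _ _ (by omega), PySem.List.pyGetD_of_nonneg _ _ hj]
  rw [show (j + 1).toNat = j.toNat + 1 by omega]
  simp

theorem strideB (parts : List String) :
    (PySem.List.pyRange 1 ((parts.length : Int) - 1) 2).map
        (fun j => PySem.Str.strip (PySem.List.pyGetD parts j ""))
      = oddFS (parts.map String.toList) := by
  match parts with
  | [] => rw [pyRange_pos_nil _ _ _ (by omega) (by simp)]; simp [oddFS]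
  | [a] => rw [pyRange_pos_nil _ _ _ (by omega) (by simp)]; simp [oddFS]
  | [a, b] => rw [pyRange_pos_nil _ _ _ (by omega) (by simp)]; simp [oddFS]
  | a :: b :: c0 :: rest =>
    have hlen : ((a :: b :: c0 :: rest).length : Int) - 1 = ((rest.length : Int) + 2) := by
      simp; ring
    rw [hlen]
    rw [pyRange_pos_cons 1 _ 2 (by omega) (by omega)]
    rw [show (1 : Int) + 2 = 3 by norm_num]
    rw [show (3 : Int) = 1 + 2 by norm_num,
      pyRange_shift 1 (rest.length : Int) 2 2 (by omega)]
    simp only [List.map_cons, List.map_map]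
    congr 1
    · -- head: parts[1].strip() is strip of the first interior segment
      rw [PySem.List.pyGetD_of_nonneg _ _ (by omega)]
      simp only [Int.toNat_one, List.getD_cons_succ, List.getD_cons_zero]
      apply String.ext
      rw [PySem.Str.toList_strip]
      rw [String.toList_ofList]
    · -- tail: shift the stride by two positions and recurse
      have hmap : List.map ((fun j => PySem.Str.strip (PySem.List.pyGetD (a :: b :: c0 :: rest) j "")) ∘ (· + 2))
            (PySem.List.pyRange 1 (rest.length : Int) 2)
          = List.map (fun j => PySem.Str.strip (PySem.List.pyGetD (c0 :: rest) j ""))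
            (PySem.List.pyRange 1 (rest.length : Int) 2) := by
        apply List.map_congr_left
        intro j hj
        have h1 : 1 ≤ j := ((PySem.List.mem_pyRange_iff_of_pos (by omega) j).mp hj).1
        simp only [Function.comp]
        rw [show j + 2 = (j + 1) + 1 by ring,
          pyGetD_cons_succ _ _ _ _ (by omega),
          pyGetD_cons_succ _ _ _ _ (by omega)]
      rw [hmap]
      have hre : ((c0 :: rest).length : Int) - 1 = (rest.length : Int) := by simp
      have := strideB (c0 :: rest)
      rw [hre] at this
      rw [this]
      simp

-- ===== VERDICT (by name: the statement is the Claim_ definition above) =====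
theorem iter_backticked_py_spec : Claim_equal_iter_backticked_py := by
  intro line _
  unfold Spec_iter_backticked_py iter_backticked_py iter_backticked_py_alt
  have hsep : ("`" : String).toList = ['`'] := by decide
  have h1 : Option.map (List.map String.toList) (PySem.Str.split? line "`")
      = some (PySem.Chars.splitOn line.toList ['`']) := by
    rw [PySem.Str.split?_map, hsep]
    simp [PySem.Chars.split?]
  rcases Option.map_eq_some_iff.mp h1 with ⟨q, hq, hmapq⟩
  rw [hq]
  simp only [Option.getD_some]
  rw [strideB q, hmapq, chars_splitOn_eq_splitRef]
  rw [aLoop_eq line.toList 0 (by omega)]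
  simp
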